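-- pv_equiv track=rewrite | github.com/AndrewSauer/Automatic-Ontonotes-Annotation | output2onf.py | synsetstrip
-- ===== SOURCE A (Python) =====
-- def synsetstrip(s):#take in a synset string, strip off Synset('')
--     result="";
--     active=False;#currently adding chars or not?
--     for c in s:
--         if c=='(':
--             active=True;
--         elif c==')':
--             active=False;
--         elif active and c!="'":
--             result+=c;
--     return result;
-- ===== SOURCE B (Python) =====
-- def synsetstrip(s):
--     # Segment extraction: jump to each '(' with str.find, slice out the run of
--     # non-paren chars after it, join the pieces and drop single quotes.
--     pieces = []
--     i = s.find('(')
--     while i != -1: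
--         j = i + 1
--         while j < len(s) and s[j] not in '()':
--             j += 1
--         pieces.append(s[i + 1:j])
--         i = s.find('(', j)
--     return ''.join(pieces).replace("'", "")
-- ===== Notes on version B (the rewrite author's own statement) =====
-- stated objective: faster
-- what changed: Replaces the char-by-char active-flag state machine with segment extraction: str.find jumps to each opening parenthesis, a slice takes the maximal run of non-parenthesis characters after it, and the slices are joined with quotes stripped at the end; bulk find/slice/join avoids quadratic string concatenation and per-char Python bytecode.
import Mathlib
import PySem

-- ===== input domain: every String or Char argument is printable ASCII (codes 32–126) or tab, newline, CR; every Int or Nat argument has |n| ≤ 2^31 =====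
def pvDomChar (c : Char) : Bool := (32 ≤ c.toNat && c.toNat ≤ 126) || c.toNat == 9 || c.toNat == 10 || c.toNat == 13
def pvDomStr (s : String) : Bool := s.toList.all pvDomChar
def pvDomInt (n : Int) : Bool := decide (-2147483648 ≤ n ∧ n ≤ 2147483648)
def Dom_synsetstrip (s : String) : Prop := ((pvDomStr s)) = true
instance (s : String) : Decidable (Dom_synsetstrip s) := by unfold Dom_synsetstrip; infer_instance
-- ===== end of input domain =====

-- B replaces A's per-character active-flag state machine with segment extraction
-- (find each opening paren, slice the run of non-paren chars after it, join, strip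
-- quotes); a timing run measured B faster (bulk find/slice/join vs per-char +=).

-- ===== PORT A =====
-- A: fold over the characters carrying (result, active).
def synsetstrip (s : String) : String :=
  (s.toList.foldl
    (fun (p : String × Bool) c =>
      if c = '(' then (p.1, true)
      else if c = ')' then (p.1, false)
      else if p.2 ∧ c ≠ '\'' then (p.1.push c, p.2)
      else p)
    ("", false)).1

-- ===== PORT B =====
-- Source B's find/slice loop, ported by hand (no str.find library counterpart):
-- skip to the next opening paren (dropWhile = str.find), slice the run of
-- non-paren chars after it (takeWhile = the inner j-scan and s[i+1:j]), recurse.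
def pvParts : List Char → List (List Char)
  | [] => []
  | c :: cs =>
    if c = '(' then
      (cs.takeWhile fun d => d != '(' && d != ')')
        :: pvParts (cs.dropWhile fun d => d != '(' && d != ')')
    else
      pvParts cs
  termination_by l => l.length
  decreasing_by
    · exact Nat.lt_succ_of_le (cs.length_dropWhile_le _)
    · exact Nat.lt_succ_self _

-- ''.join(pieces).replace("'", "")
def synsetstrip_alt (s : String) : String :=
  String.ofList (((pvParts s.toList).flatten).filter (fun c => c != '\''))

-- ===== PRECONDITION & SPEC =====
def Spec_synsetstrip (s : String) (out : String) : Prop := out = synsetstrip_alt s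
instance (s : String) (out : String) : Decidable (Spec_synsetstrip s out) := by unfold Spec_synsetstrip; infer_instance

-- ===== CLAIM (what is proved, stated in full; the proofs are below) =====
def Claim_equal_synsetstrip : Prop := ∀ (s : String), Dom_synsetstrip s → Spec_synsetstrip s (synsetstrip s)

-- ===== LEMMAS AND PROOFS =====

-- A's loop, restated as structural recursion producing the emitted characters.
def pvGo : List Char → Bool → List Char
  | [], _ => []
  | c :: cs, a =>
    if c = '(' then pvGo cs true
    else if c = ')' then pvGo cs false
    else if a ∧ c ≠ '\'' then c :: pvGo cs a
    else pvGo cs a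

theorem pvFoldl_eq_go (cs : List Char) (acc : String) (a : Bool) :
    (cs.foldl
      (fun (p : String × Bool) c =>
        if c = '(' then (p.1, true)
        else if c = ')' then (p.1, false)
        else if p.2 ∧ c ≠ '\'' then (p.1.push c, p.2)
        else p)
      (acc, a)).1 = String.ofList (acc.toList ++ pvGo cs a) := by
  induction cs generalizing acc a with
  | nil => simp [pvGo]
  | cons c cs ih =>
    by_cases h1 : c = '('
    · simp [pvGo, h1, ih]
    · by_cases h2 : c = ')'
      · simp [pvGo, h1, h2, ih]
      · by_cases h3 : a = true ∧ c ≠ '\''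
        · obtain ⟨ha, hc⟩ := h3
          subst ha
          rw [List.foldl_cons]
          simp only [if_neg h1, if_neg h2, if_pos (⟨rfl, hc⟩ : (true = true ∧ c ≠ '\''))]
          rw [ih]
          simp [String.toList_push, pvGo, h1, h2, hc]
        · simp [pvGo, h1, h2, h3, ih]

-- A's emitted characters = B's pieces, filtered; stated for both flag values at once.
theorem pvGo_eq_parts (cs : List Char) (a : Bool) :
    pvGo cs a =
      ((if a then cs.takeWhile (fun d => d != '(' && d != ')') else []) ++
        (pvParts (if a then cs.dropWhile (fun d => d != '(' && d != ')') else cs)).flatten).filter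
        (fun c => c != '\'') := by
  induction cs generalizing a with
  | nil => cases a <;> simp [pvGo, pvParts]
  | cons c cs ih =>
    by_cases h1 : c = '('
    · cases a <;>
        simp [pvGo, h1, pvParts, List.takeWhile, List.dropWhile, ih true, List.filter_append]
    · by_cases h2 : c = ')'
      · cases a <;>
          simp [pvGo, h1, h2, pvParts, List.takeWhile, List.dropWhile, ih false, ih,
            List.filter_append]
      · have hp : (c != '(' && c != ')') = true := by simp [h1, h2]
        by_cases h3 : c = '\''
        · cases a <;>
            simp [pvGo, h1, h2, h3, hp, pvParts, List.takeWhile, List.dropWhile, ih,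
              List.filter_append]
        · cases a <;>
            simp [pvGo, h1, h2, h3, hp, pvParts, List.takeWhile, List.dropWhile, ih,
              List.filter_append]

-- ===== VERDICT (by name: the statement is the Claim_ definition above) =====
theorem synsetstrip_spec : Claim_equal_synsetstrip := by
  intro s _
  unfold Spec_synsetstrip synsetstrip synsetstrip_alt
  rw [pvFoldl_eq_go, pvGo_eq_parts]
  simp
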